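-- pv_equiv track=rewrite | github.com/geraldabrhm/TBFO01 | process_file.py | splitKurungBuka
-- ===== SOURCE A (Python) =====
-- def splitKurungBuka (array):
--   j = 0
--   for content in array:
--     i = 0
--     for char in content:
--       if char == "(" and i != 0:
--         temp = array[j]
--         cut = content[:i]
--         buka = content[i:i+1]
--         tail = content[i+1:]
--         array.insert(j,cut)
--         array.insert(j+1,buka)
--         if tail != '':
--           array.insert(j+2,tail)
--         array.remove(temp)
--         break
--       i += 1
--     j += 1
--   return array
-- ===== SOURCE B (Python) =====
-- # Single forward scan per string driven by str.find over indices: emit the fragment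
-- # before each '(' that does not start the current fragment, the '(' itself as its own
-- # token, then continue after it.  Like A, mutates `array` in place and returns it.
-- def splitKurungBuka(array):
--     out = []
--     for s in array:
--         i = 0
--         while True:
--             j = s.find('(', i + 1)
--             if j == -1:
--                 out.append(s[i:])
--                 break
--             out.append(s[i:j])
--             out.append('(')
--             i = j + 1
--             if i >= len(s):
--                 break
--     array[:] = out
--     return array
-- ===== Notes on version B (the rewrite author's own statement) =====
-- stated objective: alternative
-- what changed: Replaces A's mutate-in-place strategy (re-iterating over the list it is editing, and paying an insert+insert+remove pass over the whole list for every '(' found) with a single find-driven forward scan of each string that emits the tokens into a fresh list, assigned back in place at the end.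
import Mathlib
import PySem

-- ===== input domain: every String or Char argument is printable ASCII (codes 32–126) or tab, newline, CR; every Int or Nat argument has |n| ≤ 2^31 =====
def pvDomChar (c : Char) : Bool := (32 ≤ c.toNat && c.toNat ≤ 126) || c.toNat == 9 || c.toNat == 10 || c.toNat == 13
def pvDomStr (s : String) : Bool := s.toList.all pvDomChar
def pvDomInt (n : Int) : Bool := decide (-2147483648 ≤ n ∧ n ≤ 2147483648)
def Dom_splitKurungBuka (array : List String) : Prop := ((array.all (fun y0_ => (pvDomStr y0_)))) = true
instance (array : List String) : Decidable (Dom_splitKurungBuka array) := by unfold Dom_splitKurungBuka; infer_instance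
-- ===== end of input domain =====

-- B replaces A's in-place insert/remove editing with a single find-driven forward scan
-- of each string that emits the tokens into a fresh list; both Pythons mutate `array`
-- in place and return it — the theorems are about the return value.

-- ===== PORT A =====
-- inner loop `for char in content: if char == "(" and i != 0: … break; i += 1`:
-- returns the first index i with content[i] == '(' and i != 0 (none = no break).
def splitKurungBuka_goF : List Char → Nat → Option Nat
  | [], _ => none
  | c :: cs, i => if c = '(' ∧ i ≠ 0 then some i else splitKurungBuka_goF cs (i + 1)

def splitKurungBuka_findSplit (content : String) : Option Nat :=
  splitKurungBuka_goF content.toList 0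

-- Python's `for content in array` over the mutating list = cursor k into the current
-- list; j is the source's own counter (they stay equal).  The loop is fueled; the fuel
-- chosen in splitKurungBuka below is proved sufficient inside the equivalence proof
-- (lemma splitKurungBuka_loop_eq), so the 0-fuel branch is never reached.
def splitKurungBuka_loop : Nat → List String → Nat → Int → List String
  | 0, arr, _, _ => arr
  | fuel + 1, arr, k, j =>
    if h : k < arr.length then
      let content := arr[k]
      match splitKurungBuka_findSplit content with
      | none => splitKurungBuka_loop fuel arr (k + 1) (j + 1)
      | some i =>
        -- temp = array[j]  (j is always in range here, so pyGet? is some; Python raises otherwise)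
        let temp := (PySem.List.pyGet? arr j).getD ""
        let cut := PySem.Str.slice content none (some (i : Int))
        let buka := PySem.Str.slice content (some (i : Int)) (some ((i : Int) + 1))
        let tail := PySem.Str.slice content (some ((i : Int) + 1)) none
        let a1 := PySem.List.insert arr j cut
        let a2 := PySem.List.insert a1 (j + 1) buka
        let a3 := if tail ≠ "" then PySem.List.insert a2 (j + 2) tail else a2
        -- array.remove(temp): temp is always present here, so remove? is some (Python raises otherwise)
        let a4 := (PySem.List.remove? a3 temp).getD a3
        splitKurungBuka_loop fuel a4 (k + 1) (j + 1)
    else arr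

def splitKurungBuka (array : List String) : List String :=
  splitKurungBuka_loop (2 * (array.map (fun s => s.toList.length)).sum + array.length + 1) array 0 0

-- ===== PORT B =====
-- `while True: p = s.find('(', 1); …; s = s[p+1:]`: a forward scan of the string,
-- emitting the fragment before each '(' that does not start the current fragment,
-- the '(' itself, then continuing after it.  The while loop is fueled; the fuel
-- passed below (len+1) is proved sufficient in lemmas tokB_eq/tokB_top.
def splitKurungBuka_tokB : Nat → String → Int → List String
  | 0, _, _ => []
  | fuel + 1, s, i =>
    let j := PySem.Str.findFrom s "(" (i + 1) none
    if j = -1 then [PySem.Str.slice s (some i) none]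
    else
      PySem.Str.slice s (some i) (some j) :: "(" ::
        (if j + 1 ≥ (s.toList.length : Int) then [] else splitKurungBuka_tokB fuel s (j + 1))

def splitKurungBuka_alt (array : List String) : List String :=
  array.flatMap (fun s => splitKurungBuka_tokB (s.toList.length + 1) s 0)

-- ===== PRECONDITION & SPEC =====
def Spec_splitKurungBuka (array : List String) (out : List String) : Prop := out = splitKurungBuka_alt array
instance (array : List String) (out : List String) : Decidable (Spec_splitKurungBuka array out) := by unfold Spec_splitKurungBuka; infer_instance

-- ===== CLAIM (what is proved, stated in full; the proofs are below) =====
def Claim_equal_splitKurungBuka : Prop := ∀ (array : List String), Dom_splitKurungBuka array → Spec_splitKurungBuka array (splitKurungBuka array)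

-- ===== LEMMAS AND PROOFS =====

-- character-level scan of one string (the reference tokenizer both ports are related to)
def tokGoC : List Char → List Char → List (List Char)
  | [], cur => if cur = [] then [] else [cur]
  | ch :: rest, cur =>
    if ch = '(' ∧ cur ≠ [] then cur :: ['('] :: tokGoC rest []
    else tokGoC rest (cur ++ [ch])

def tokensC (s : String) : List String :=
  match s.toList with
  | [] => [""]
  | c :: cs => (tokGoC cs [c]).map (fun t => String.ofList t)


-- list of tokens of a character list (tokGo with an empty accumulator)
def tokL : List Char → List (List Char)
  | [] => []
  | c :: cs => tokGoC cs [c]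

theorem tokGo_nil_acc (cs : List Char) : tokGoC cs [] = tokL cs := by
  cases cs <;> simp [tokGoC, tokL]

-- counter shift for A's inner scan
theorem goF_shift (cs : List Char) : ∀ n : Nat,
    splitKurungBuka_goF cs (n + 1) = (splitKurungBuka_goF cs 1).map (fun i => i + n) := by
  induction cs with
  | nil => intro n; simp [splitKurungBuka_goF]
  | cons c cs ih =>
    intro n
    by_cases hc : c = '('
    · simp [splitKurungBuka_goF, hc, Nat.add_comm]
    · simp only [splitKurungBuka_goF, hc, false_and, if_false, ih (n+1), ih 1]
      cases splitKurungBuka_goF cs 1 <;> simp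
      omega

-- decomposition produced by a successful inner scan
theorem goF_spec (cs : List Char) : ∀ n i : Nat, splitKurungBuka_goF cs (n + 1) = some i →
    ∃ p q, cs = p ++ '(' :: q ∧ '(' ∉ p ∧ i = n + 1 + p.length := by
  induction cs with
  | nil => intro n i h; simp [splitKurungBuka_goF] at h
  | cons c cs ih =>
    intro n i h
    by_cases hc : c = '('
    · simp [splitKurungBuka_goF, hc] at h
      exact ⟨[], cs, by simp [hc], by simp, by simp [h.symm]⟩
    · simp [splitKurungBuka_goF, hc] at h
      obtain ⟨p, q, hpq, hp, hi⟩ := ih (n+1) i h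
      exact ⟨c :: p, q, by simp [hpq], by simp [hp, Ne.symm, hc], by simp [hi]; omega⟩

theorem goF_of_not_mem (cs : List Char) (h : '(' ∉ cs) : ∀ n : Nat, splitKurungBuka_goF cs (n + 1) = none := by
  induction cs with
  | nil => intro n; simp [splitKurungBuka_goF]
  | cons c cs ih =>
    intro n
    simp at h
    simp [splitKurungBuka_goF, Ne.symm h.1, ih h.2]

theorem goF_ge (cs : List Char) : ∀ n i, splitKurungBuka_goF cs (n+1) = some i → n + 1 ≤ i := by
  induction cs with
  | nil => intro n i h; simp [splitKurungBuka_goF] at h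
  | cons c cs ih =>
    intro n i h
    by_cases hc : c = '(' <;> simp [splitKurungBuka_goF, hc] at h
    · omega
    · have := ih (n+1) i h; omega

-- B's scan, characterised by A's inner scan
theorem tokGo_eq (cs : List Char) : ∀ cur : List Char, cur ≠ [] →
    tokGoC cs cur =
      match splitKurungBuka_goF cs 1 with
      | none => [cur ++ cs]
      | some i => (cur ++ cs.take (i - 1)) :: ['('] :: tokL (cs.drop i) := by
  induction cs with
  | nil => intro cur h; simp [tokGoC, splitKurungBuka_goF, h]
  | cons c cs ih =>
    intro cur h
    by_cases hc : c = '('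
    · simp [tokGoC, splitKurungBuka_goF, hc, h, tokGo_nil_acc]
    · rw [show tokGoC (c :: cs) cur = tokGoC cs (cur ++ [c]) by
        simp [tokGoC, hc]]
      rw [show splitKurungBuka_goF (c :: cs) 1 = splitKurungBuka_goF cs 2 by
        simp [splitKurungBuka_goF, hc]]
      rw [goF_shift cs 1, ih (cur ++ [c]) (by simp)]
      cases hg : splitKurungBuka_goF cs 1 with
      | none => simp
      | some i =>
        have hge := goF_ge cs 0 i hg
        simp only [Option.map_some]
        rw [show i + 1 - 1 = (i - 1) + 1 by omega]
        rw [show i = (i-1)+1 by omega]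
        simp [List.take_succ_cons, List.drop_succ_cons]

theorem remove?_append_of_not_mem {α : Type} [DecidableEq α] (xs : List α) (ys : List α) (v : α)
    (h : v ∉ xs) : PySem.List.remove? (xs ++ ys) v = (PySem.List.remove? ys v).map (xs ++ ·) := by
  induction xs with
  | nil => simp
  | cons x xs ih =>
    simp at h
    rw [List.cons_append, PySem.List.remove?_cons_of_ne (xs ++ ys) (Ne.symm h.1), ih h.2]
    cases PySem.List.remove? ys v <;> simp

def muA (rest : List String) : Nat := (rest.map (fun s => 2 * s.toList.length + 1)).sum + 1

theorem goF_first (p q : List Char) (hp : '(' ∉ p) : ∀ n : Nat,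
    splitKurungBuka_goF (p ++ '(' :: q) (n + 1) = some (n + 1 + p.length) := by
  induction p with
  | nil => intro n; simp [splitKurungBuka_goF]
  | cons a p ih =>
    intro n
    simp at hp
    have := ih hp.2 (n + 1)
    simp [splitKurungBuka_goF, Ne.symm hp.1, this]
    omega

theorem tokens_cons (s : String) (c : Char) (cs : List Char) (hs : s.toList = c :: cs) :
    tokensC s = (tokGoC cs [c]).map (fun t => String.ofList t) := by
  rw [tokensC, hs]

theorem tokens_of_none (s : String) (h : splitKurungBuka_findSplit s = none) :
    tokensC s = [s] := by
  cases hs : s.toList with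
  | nil =>
    have hse : s = "" := by
      have := congrArg String.ofList hs
      simpa [String.ofList_toList] using this
    subst hse
    rfl
  | cons c cs =>
    have hfs : splitKurungBuka_goF cs 1 = none := by
      simpa [splitKurungBuka_findSplit, hs, splitKurungBuka_goF] using h
    rw [tokens_cons s c cs hs, tokGo_eq cs [c] (by simp), hfs]
    simp
    rw [← hs, String.ofList_toList]

theorem tokens_of_decomp (s : String) (c : Char) (p q : List Char)
    (hs : s.toList = c :: (p ++ '(' :: q)) (hp : '(' ∉ p) :
    tokensC s =
      String.ofList (c :: p) :: String.ofList ['('] :: (tokL q).map (fun t => String.ofList t) := by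
  rw [tokens_cons s c _ hs, tokGo_eq _ [c] (by simp), goF_first p q hp 0]
  simp only [Nat.zero_add, List.map_cons]
  rw [show (1 : Nat) + p.length - 1 = p.length by omega, List.take_left]
  rw [show (1 : Nat) + p.length = (p ++ ['(']).length by (simp; omega)]
  rw [show p ++ '(' :: q = (p ++ ['(']) ++ q by simp, List.drop_left]
  rfl

theorem tokens_ofList (t : List Char) (h : t ≠ []) :
    tokensC (String.ofList t) = (tokL t).map (fun u => String.ofList u) := by
  cases t with
  | nil => simp at h
  | cons c cs => rw [tokens_cons _ c cs String.toList_ofList]; rfl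

theorem insert_mid (pre post : List String) (v : String) (m : Nat) (hm : m ≤ post.length) :
    PySem.List.insert (pre ++ post) (((pre.length + m : Nat) : Int)) v
      = pre ++ (post.take m ++ v :: post.drop m) := by
  rw [PySem.List.insert_natCast _ _ _ (by simp; omega)]
  rw [List.take_length_add_append, List.drop_length_add_append]
  simp

theorem splitKurungBuka_loop_eq : ∀ (fuel : Nat) (done rest : List String),
    (∀ d ∈ done, splitKurungBuka_findSplit d = none) → muA rest ≤ fuel →
    splitKurungBuka_loop fuel (done ++ rest) done.length (done.length : Int) =
      done ++ rest.flatMap tokensC := by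
  intro fuel
  induction fuel with
  | zero => intro done rest _ hmu; simp [muA] at hmu
  | succ fuel ih =>
    intro done rest hdone hmu
    cases rest with
    | nil =>
      rw [splitKurungBuka_loop]
      simp
    | cons content rest' =>
      have hk : done.length < (done ++ content :: rest').length := by simp
      have hget : (done ++ content :: rest')[done.length]'hk = content := by
        simp
      rw [splitKurungBuka_loop, dif_pos hk]
      cases hfs : splitKurungBuka_findSplit content with
      | none =>
        simp only [hget, hfs]
        have hdone' : ∀ d ∈ done ++ [content], splitKurungBuka_findSplit d = none := by
          intro d hd
          rcases List.mem_append.1 hd with h | h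
          · exact hdone d h
          · simp at h; subst h; exact hfs
        have hmu' : muA rest' ≤ fuel := by
          simp [muA] at hmu ⊢; omega
        have h2 := ih (done ++ [content]) rest' hdone' hmu'
        rw [show (done ++ [content]) ++ rest' = done ++ content :: rest' by simp] at h2
        rw [show ((done ++ [content]).length) = done.length + 1 by simp] at h2
        rw [show (((done.length + 1 : Nat)) : Int) = (done.length : Int) + 1 by push_cast; ring] at h2
        rw [h2]
        simp [tokens_of_none content hfs]
      | some i =>
        simp only [hget, hfs]
        -- decompose content around its first splittable '('
        have htl0 : content.toList ≠ [] := by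
          intro h
          rw [splitKurungBuka_findSplit, h] at hfs
          simp [splitKurungBuka_goF] at hfs
        obtain ⟨c, cs, htl⟩ : ∃ c cs, content.toList = c :: cs := by
          cases h : content.toList with
          | nil => exact absurd h htl0
          | cons c cs => exact ⟨c, cs, rfl⟩
        have hfs' : splitKurungBuka_goF cs 1 = some i := by
          simpa [splitKurungBuka_findSplit, htl, splitKurungBuka_goF] using hfs
        obtain ⟨p, q, hcs, hp, hi⟩ := goF_spec cs 0 i hfs'
        have htlc : content.toList = c :: (p ++ '(' :: q) := by rw [htl, hcs]
        -- the three slices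
        have hia : (i : Int) = ((p.length + 1 : Nat) : Int) := by push_cast; omega
        have hib : (i : Int) + 1 = ((p.length + 2 : Nat) : Int) := by push_cast; omega
        have hcut : PySem.Str.slice content none (some (i : Int)) = String.ofList (c :: p) := by
          simp only [PySem.Str.slice, PySem.Chars.slice_eq_listSlice, htlc, hia,
            PySem.List.slice_to_natCast, List.take_succ_cons, List.take_left]
        have hbuka : PySem.Str.slice content (some (i : Int)) (some ((i : Int) + 1)) =
            String.ofList ['('] := by
          simp only [PySem.Str.slice, PySem.Chars.slice_eq_listSlice, htlc, hia]
          rw [show ((p.length + 1 : Nat) : Int) + 1 = ((p.length + 2 : Nat) : Int) by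
            push_cast; ring]
          rw [PySem.List.slice_natCast]
          rw [show p.length + 2 - (p.length + 1) = 1 by omega, List.drop_succ_cons,
            List.drop_left]
          simp
        have htail : PySem.Str.slice content (some ((i : Int) + 1)) none = String.ofList q := by
          simp only [PySem.Str.slice, PySem.Chars.slice_eq_listSlice, htlc, hib,
            PySem.List.slice_from_natCast]
          rw [show p.length + 2 = (p.length + 1) + 1 by omega, List.drop_succ_cons]
          rw [show p ++ '(' :: q = (p ++ ['(']) ++ q by simp,
            show p.length + 1 = (p ++ ['(']).length by simp, List.drop_left]
        have htemp : (PySem.List.pyGet? (done ++ content :: rest') ((done.length : Nat) : Int)).getD ""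
            = content := by
          rw [PySem.List.pyGet?_natCast]
          simp
        rw [htemp, hcut, hbuka, htail]
        -- inequations for remove
        have hlen_content : content.toList.length = p.length + q.length + 2 := by
          rw [htlc]; simp; omega
        have hnotdone : content ∉ done := by
          intro hmem
          rw [hdone content hmem] at hfs
          simp at hfs
        have hne_cut : String.ofList (c :: p) ≠ content := by
          intro h
          have := congrArg (fun t => t.toList.length) h
          simp [hlen_content] at this
          omega
        have hne_buka : String.ofList ['('] ≠ content := by
          intro h
          have := congrArg (fun t => t.toList.length) h
          simp [hlen_content] at this
        have hne_tail : String.ofList q ≠ content := by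
          intro h
          have := congrArg (fun t => t.toList.length) h
          simp [hlen_content] at this
          omega
        -- the new "done" prefix
        have hdone2 : ∀ d ∈ done ++ [String.ofList (c :: p)], splitKurungBuka_findSplit d = none := by
          intro d hd
          rcases List.mem_append.1 hd with h | h
          · exact hdone d h
          · simp at h; subst h
            rw [splitKurungBuka_findSplit, String.toList_ofList]
            rw [show splitKurungBuka_goF (c :: p) 0 = splitKurungBuka_goF p 1 by
              simp [splitKurungBuka_goF]]
            exact goF_of_not_mem p hp 0
        have hlen2 : ((done ++ [String.ofList (c :: p)]).length) = done.length + 1 := by simp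
        have hcast2 : (((done.length + 1 : Nat)) : Int) = (done.length : Int) + 1 := by
          push_cast; ring
        -- first two inserts
        have ha1 : PySem.List.insert (done ++ content :: rest') ((done.length : Nat) : Int)
            (String.ofList (c :: p)) = done ++ String.ofList (c :: p) :: content :: rest' := by
          have := insert_mid done (content :: rest') (String.ofList (c :: p)) 0 (by simp)
          simpa using this
        have ha2 : PySem.List.insert (done ++ String.ofList (c :: p) :: content :: rest')
            ((done.length : Int) + 1) (String.ofList ['(']) =
            done ++ String.ofList (c :: p) :: String.ofList ['('] :: content :: rest' := by
          have := insert_mid done (String.ofList (c :: p) :: content :: rest')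
            (String.ofList ['(']) 1 (by simp)
          rw [hcast2] at this
          simpa using this
        rw [ha1, ha2]
        -- tokens of the pieces
        have htok_content := tokens_of_decomp content c p q htlc hp
        have htok_buka : tokensC (String.ofList ['(']) = [String.ofList ['(']] := by
          apply tokens_of_none
          rw [splitKurungBuka_findSplit, String.toList_ofList]
          simp [splitKurungBuka_goF]
        cases hq : q with
        | nil =>
          subst hq
          -- tail == "" : no third insert
          rw [if_neg (by simp : ¬ (String.ofList ([] : List Char) ≠ ""))]
          rw [remove?_append_of_not_mem _ _ _ hnotdone,
            PySem.List.remove?_cons_of_ne _ hne_cut,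
            PySem.List.remove?_cons_of_ne _ hne_buka,
            PySem.List.remove?_cons_self]
          simp only [Option.map_some, Option.getD_some]
          have hmu2 : muA (String.ofList ['('] :: rest') ≤ fuel := by
            have hlc : content.length = p.length + 2 := by simpa using hlen_content
            have hpl : ("(" : String).length = 1 := rfl
            simp [muA, hlc] at hmu ⊢
            omega
          have h2 := ih (done ++ [String.ofList (c :: p)]) (String.ofList ['('] :: rest')
            hdone2 hmu2
          rw [hlen2, hcast2] at h2
          rw [show (done ++ [String.ofList (c :: p)]) ++ String.ofList ['('] :: rest' =
            done ++ String.ofList (c :: p) :: String.ofList ['('] :: rest' by simp] at h2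
          rw [h2]
          simp [htok_content, htok_buka, tokL]
        | cons d ds =>
          rw [← hq]
          -- tail nonempty: third insert
          rw [if_pos (by simp [hq] : (String.ofList q ≠ ""))]
          have ha3 : PySem.List.insert
              (done ++ String.ofList (c :: p) :: String.ofList ['('] :: content :: rest')
              ((done.length : Int) + 2) (String.ofList q) =
              done ++ String.ofList (c :: p) :: String.ofList ['('] :: String.ofList q ::
                content :: rest' := by
            have := insert_mid done
              (String.ofList (c :: p) :: String.ofList ['('] :: content :: rest')
              (String.ofList q) 2 (by simp)
            rw [show (((done.length + 2 : Nat)) : Int) = (done.length : Int) + 2 by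
              push_cast; ring] at this
            simpa using this
          rw [ha3]
          rw [remove?_append_of_not_mem _ _ _ hnotdone,
            PySem.List.remove?_cons_of_ne _ hne_cut,
            PySem.List.remove?_cons_of_ne _ hne_buka,
            PySem.List.remove?_cons_of_ne _ hne_tail,
            PySem.List.remove?_cons_self]
          simp only [Option.map_some, Option.getD_some]
          have hmu2 : muA (String.ofList ['('] :: String.ofList q :: rest') ≤ fuel := by
            have hlc : content.length = p.length + q.length + 2 := by simpa using hlen_content
            have hpl : ("(" : String).length = 1 := rfl
            simp [muA, hlc, String.length_ofList] at hmu ⊢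
            omega
          have hdq : q ≠ [] := by simp [hq]
          have h2 := ih (done ++ [String.ofList (c :: p)])
            (String.ofList ['('] :: String.ofList q :: rest') hdone2 hmu2
          rw [hlen2, hcast2] at h2
          rw [show (done ++ [String.ofList (c :: p)]) ++
              String.ofList ['('] :: String.ofList q :: rest' =
              done ++ String.ofList (c :: p) :: String.ofList ['('] :: String.ofList q :: rest'
              by simp] at h2
          rw [h2]
          simp [htok_content, htok_buka, tokens_ofList q hdq]

theorem goF_none (cs : List Char) : ∀ n : Nat, splitKurungBuka_goF cs (n + 1) = none → '(' ∉ cs := by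
  induction cs with
  | nil => simp
  | cons c cs ih =>
    intro n h
    by_cases hc : c = '(' <;> simp [splitKurungBuka_goF, hc] at h
    simp [Ne.symm hc]
    exact ih (n+1) h

theorem find_paren_none (cs : List Char) (h : '(' ∉ cs) : PySem.Chars.find cs ['('] = -1 := by
  rw [PySem.Chars.find_eq_neg_one_iff, List.singleton_infix_iff]
  exact h

theorem find_paren_decomp (u q : List Char) (hu : '(' ∉ u) :
    PySem.Chars.find (u ++ '(' :: q) ['('] = (u.length : Int) := by
  have hinf : ['('] <:+: (u ++ '(' :: q) := by
    rw [List.singleton_infix_iff]; simp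
  have hnn : 0 ≤ PySem.Chars.find (u ++ '(' :: q) ['('] := by
    rw [PySem.Chars.find_nonneg_iff]; exact hinf
  obtain ⟨hpre, hmin⟩ := PySem.Chars.find_spec hnn
  set f := PySem.Chars.find (u ++ '(' :: q) ['('] with hf
  have hft : ¬ f.toNat < u.length := by
    intro hlt
    have hdrop : (u ++ '(' :: q).drop f.toNat
        = u[f.toNat] :: (u.drop (f.toNat + 1) ++ '(' :: q) := by
      rw [List.drop_append_of_le_length (by omega), List.drop_eq_getElem_cons hlt,
        List.cons_append]
    rw [hdrop] at hpre
    rcases (List.cons_prefix_cons.1 hpre) with ⟨h1, _⟩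
    exact hu (h1 ▸ List.getElem_mem hlt)
  have hle : ¬ u.length < f.toNat := by
    intro hlt
    apply hmin u.length hlt
    rw [List.drop_left]
    exact ⟨q, rfl⟩
  omega

theorem tokB_eq : ∀ (fuel : Nat) (s : String) (i : Nat), i < s.toList.length →
    s.toList.length - i ≤ fuel →
    splitKurungBuka_tokB fuel s (i : Int) = tokensC (String.ofList (s.toList.drop i)) := by
  intro fuel
  induction fuel with
  | zero => intro s i h1 h2; exact absurd h2 (by omega)
  | succ fuel ih =>
    intro s i hi hf
    obtain ⟨c, cs', hdrop⟩ : ∃ c cs', s.toList.drop i = c :: cs' := by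
      cases h : s.toList.drop i with
      | nil =>
        exfalso
        have hl := congrArg List.length h
        rw [List.length_drop] at hl
        simp only [List.length_nil] at hl
        omega
      | cons c cs' => exact ⟨c, cs', rfl⟩
    have hcs' : cs' = s.toList.drop (i + 1) := by
      have := congrArg List.tail hdrop
      simpa [List.tail_drop] using this.symm
    have hbridge : PySem.Str.findFrom s "(" ((i : Int) + 1) none
        = PySem.Chars.findFrom s.toList ['('] ((i : Int) + 1) none := by simp
    have hFF : PySem.Str.findFrom s "(" ((i : Int) + 1) none =
        (if PySem.Chars.find cs' ['('] = -1 then -1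
         else ((i + 1 : Nat) : Int) + PySem.Chars.find cs' ['(']) := by
      rw [hbridge, show ((i : Int) + 1) = ((i + 1 : Nat) : Int) by push_cast; ring,
        PySem.Chars.findFrom_natCast s.toList ['('] (i + 1) (by omega), ← hcs']
    cases hgf : splitKurungBuka_goF cs' 1 with
    | none =>
      have hnp : '(' ∉ cs' := goF_none cs' 0 hgf
      rw [splitKurungBuka_tokB]
      simp only [hFF, find_paren_none cs' hnp, if_pos]
      rw [show PySem.Str.slice s (some (i : Int)) none = String.ofList (s.toList.drop i) by
        simp only [PySem.Str.slice, PySem.Chars.slice_eq_listSlice,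
          PySem.List.slice_from_natCast]]
      rw [tokens_of_none _ (by
        rw [splitKurungBuka_findSplit, String.toList_ofList, hdrop,
          show splitKurungBuka_goF (c :: cs') 0 = splitKurungBuka_goF cs' 1 by
            simp [splitKurungBuka_goF]]
        exact hgf)]
    | some ii =>
      obtain ⟨u, q, hcs, hu, hii⟩ := goF_spec cs' 0 ii hgf
      have hfrag : s.toList.drop i = c :: (u ++ '(' :: q) := by rw [hdrop, hcs]
      have hfind : PySem.Chars.find cs' ['('] = (u.length : Int) := by
        rw [hcs]; exact find_paren_decomp u q hu
      have hj : PySem.Str.findFrom s "(" ((i : Int) + 1) none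
          = ((i + u.length + 1 : Nat) : Int) := by
        rw [hFF, hfind, if_neg (by omega)]
        push_cast; ring
      have hlen : s.toList.length = i + u.length + q.length + 2 := by
        have h1 := congrArg List.length hfrag
        rw [List.length_drop] at h1
        simp only [List.length_cons, List.length_append] at h1
        omega
      have hcut : PySem.Str.slice s (some (i : Int)) (some ((i + u.length + 1 : Nat) : Int))
          = String.ofList (c :: u) := by
        simp only [PySem.Str.slice, PySem.Chars.slice_eq_listSlice, PySem.List.slice_natCast]
        rw [show i + u.length + 1 - i = u.length + 1 by omega, hfrag, List.take_succ_cons,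
          List.take_left]
      have hdropq : s.toList.drop (i + u.length + 2) = q := by
        have h2 := congrArg (List.drop (u.length + 2)) hfrag
        rw [List.drop_drop] at h2
        rw [show i + (u.length + 2) = i + u.length + 2 by omega] at h2
        rw [h2, List.drop_succ_cons, show u.length + 1 = (u ++ ['(']).length by simp,
          show u ++ '(' :: q = (u ++ ['(']) ++ q by simp, List.drop_left]
      have htok := tokens_of_decomp (String.ofList (s.toList.drop i)) c u q
        (by rw [String.toList_ofList, hfrag]) hu
      rw [splitKurungBuka_tokB]
      simp only [hj, if_neg (show ¬ ((i + u.length + 1 : Nat) : Int) = -1 by push_cast; omega),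
        hcut]
      by_cases hqe : q = []
      · rw [if_pos (by rw [hlen, hqe]; push_cast [List.length_nil]; omega), htok]
        subst hqe
        rfl
      · rw [if_neg (by
          rw [hlen]
          push_cast
          intro h
          exact hqe (List.length_eq_zero_iff.1 (by omega)))]
        have hql : 1 ≤ q.length :=
          Nat.pos_of_ne_zero (fun h => hqe (List.length_eq_zero_iff.1 h))
        have hrec := ih s (i + u.length + 2) (by omega) (by omega)
        rw [hdropq] at hrec
        rw [show ((i + u.length + 1 : Nat) : Int) + 1 = ((i + u.length + 2 : Nat) : Int) by
          push_cast; ring]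
        rw [hrec, tokens_ofList q hqe, htok]

theorem tokB_top (s : String) :
    splitKurungBuka_tokB (s.toList.length + 1) s 0 = tokensC s := by
  by_cases hse : s = ""
  · subst hse; decide
  · have hne : s.toList ≠ [] := by
      intro h
      exact hse (by have := congrArg String.ofList h; simpa [String.ofList_toList] using this)
    have hpos : 0 < s.toList.length :=
      Nat.pos_of_ne_zero (fun h0 => hne (List.length_eq_zero_iff.1 h0))
    have h := tokB_eq (s.toList.length + 1) s 0 hpos (by omega)
    simpa [String.ofList_toList] using h

-- ===== VERDICT (by name: the statement is the Claim_ definition above) =====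
theorem splitKurungBuka_spec : Claim_equal_splitKurungBuka := by
  intro array _
  unfold Spec_splitKurungBuka splitKurungBuka splitKurungBuka_alt
  have hcong : array.flatMap (fun s => splitKurungBuka_tokB (s.toList.length + 1) s 0)
      = array.flatMap tokensC :=
    List.flatMap_congr (fun s _ => tokB_top s)
  rw [hcong]
  have h := splitKurungBuka_loop_eq
      (2 * (array.map (fun s => s.toList.length)).sum + array.length + 1)
      [] array (by simp) ?_
  · simpa using h
  · unfold muA
    have hsum : ∀ l : List String, (l.map (fun s => 2 * s.toList.length + 1)).sum =
        2 * (l.map (fun s => s.toList.length)).sum + l.length := by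
      intro l
      induction l with
      | nil => simp
      | cons a t iht =>
        rw [List.map_cons, List.sum_cons, iht, List.map_cons, List.sum_cons, List.length_cons]
        ring
    rw [hsum]
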